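-- pv_equiv track=rewrite | github.com/marcocosta/kitesurf-zero-touch-channel | scripts/generate_music_old.py | build_scale
-- ===== SOURCE A (Python) =====
-- from typing import List, Tuple
--
-- def build_scale(key: str, mode: str) -> List[int]:
--     """Return MIDI degrees for the diatonic scale at octave 4 (C4=60)."""
--     key = key.upper()
--     KEYS = {"C": 60, "C#": 61, "DB": 61, "D": 62, "D#": 63, "EB": 63, "E": 64,
--             "F": 65, "F#": 66, "GB": 66, "G": 67, "G#": 68, "AB": 68, "A": 69, "A#": 70, "BB": 70, "B": 71}
--     root = KEYS.get(key)
--     if root is None: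
--         raise SystemExit(f"Unknown key: {key}")
--     if mode.lower().startswith("maj"):
--         steps = [0,2,4,5,7,9,11]
--     else:
--         # natural minor
--         steps = [0,2,3,5,7,8,10]
--     return [root + s for s in steps]
-- ===== SOURCE B (Python) =====
-- def build_scale(key: str, mode: str):
--     """Return MIDI degrees for the diatonic scale at octave 4 (C4=60)."""
--     key = key.upper()
--     KEYS = {"C": 60, "C#": 61, "DB": 61, "D": 62, "D#": 63, "EB": 63, "E": 64,
--             "F": 65, "F#": 66, "GB": 66, "G": 67, "G#": 68, "AB": 68, "A": 69, "A#": 70, "BB": 70, "B": 71}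
--     root = KEYS.get(key)
--     if root is None:
--         raise SystemExit(f"Unknown key: {key}")
--     if mode.lower().startswith("maj"):
--         intervals = [2, 2, 1, 2, 2, 2]
--     else:
--         intervals = [2, 1, 2, 2, 1, 2]
--     scale = [root]
--     note = root
--     for step in intervals:
--         note += step
--         scale.append(note)
--     return scale
-- ===== Notes on version B (the rewrite author's own statement) =====
-- stated objective: alternative
-- what changed: B replaces the fixed semitone-offset list mapped over the root with an interval (whole/half step) pattern accumulated in a loop that seeds the result with the root; Pre_ excludes keys absent from the KEYS table, where both A and B raise SystemExit.
import Mathlib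
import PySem

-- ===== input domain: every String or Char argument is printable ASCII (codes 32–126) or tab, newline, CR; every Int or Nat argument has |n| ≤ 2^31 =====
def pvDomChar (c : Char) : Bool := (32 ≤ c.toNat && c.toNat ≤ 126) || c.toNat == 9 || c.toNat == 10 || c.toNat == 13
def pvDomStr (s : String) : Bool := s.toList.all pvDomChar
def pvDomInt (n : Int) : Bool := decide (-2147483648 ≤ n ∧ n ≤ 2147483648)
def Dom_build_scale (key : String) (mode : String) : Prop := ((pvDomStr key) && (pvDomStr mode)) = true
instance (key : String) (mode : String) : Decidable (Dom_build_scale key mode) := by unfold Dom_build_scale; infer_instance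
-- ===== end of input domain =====

-- B builds the scale by accumulating whole/half-step intervals from the root instead of mapping a fixed offset list (objective: alternative decomposition).

-- ===== PORT A =====
def pvKEYS : PySem.Dict String Int := PySem.Dict.ofList
  [("C",60), ("C#",61), ("DB",61), ("D",62), ("D#",63), ("EB",63), ("E",64),
   ("F",65), ("F#",66), ("GB",66), ("G",67), ("G#",68), ("AB",68), ("A",69), ("A#",70), ("BB",70), ("B",71)]

def build_scale (key : String) (mode : String) : List Int :=
  let key := PySem.Str.upper key
  match pvKEYS.get? key with
  | none => []   -- Python: raise SystemExit — excluded by Pre_build_scale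
  | some root =>
    let steps : List Int :=
      if PySem.Str.startswith (PySem.Str.lower mode) "maj" then [0,2,4,5,7,9,11]
      else [0,2,3,5,7,8,10]
    steps.map (fun s => root + s)

-- ===== PORT B =====
def build_scale_alt (key : String) (mode : String) : List Int :=
  let key := PySem.Str.upper key
  match pvKEYS.get? key with
  | none => []   -- Python: raise SystemExit — excluded by Pre_build_scale
  | some root =>
    let intervals : List Int :=
      if PySem.Str.startswith (PySem.Str.lower mode) "maj" then [2,2,1,2,2,2]
      else [2,1,2,2,1,2]
    (intervals.foldl (fun (p : List Int × Int) step => (p.1 ++ [p.2 + step], p.2 + step)) ([root], root)).1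

-- ===== PRECONDITION & SPEC =====
-- Pre_ excludes exactly the keys whose uppercase form is not in the KEYS table: there A raises SystemExit (and B raises too).
def Pre_build_scale (key : String) (mode : String) : Prop :=
  (pvKEYS.get? (PySem.Str.upper key)).isSome = true
instance (key : String) (mode : String) : Decidable (Pre_build_scale key mode) := by unfold Pre_build_scale; infer_instance
def pvWitness_build_scale : String × String := ("c#", "major")

def Spec_build_scale (key : String) (mode : String) (out : List Int) : Prop := out = build_scale_alt key mode
instance (key : String) (mode : String) (out : List Int) : Decidable (Spec_build_scale key mode out) := by unfold Spec_build_scale; infer_instance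

-- ===== CLAIM (what is proved, stated in full; the proofs are below) =====
def Claim_equal_build_scale : Prop := ∀ (key : String) (mode : String), Dom_build_scale key mode → Pre_build_scale key mode → Spec_build_scale key mode (build_scale key mode)

-- ===== LEMMAS AND PROOFS =====

-- ===== VERDICT (by name: the statement is the Claim_ definition above) =====
theorem build_scale_spec : Claim_equal_build_scale := by
  intro key mode _ hpre
  unfold Spec_build_scale build_scale build_scale_alt
  unfold Pre_build_scale at hpre
  rw [Option.isSome_iff_exists] at hpre
  obtain ⟨root, hr⟩ := hpre
  simp only [hr]
  by_cases h : PySem.Chars.startswith (PySem.Chars.lower mode.toList) ['m','a','j'] = true <;>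
    simp [PySem.Str.startswith, h, List.foldl, List.map] <;> omega
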